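-- pv_equiv track=rewrite | github.com/ChengyueLiu/patch_range | pipeline/path_resolver.py | _path_overlap_score
-- ===== SOURCE A (Python) =====
-- def _path_overlap_score(target: str, candidate: str) -> int:
--     """Number of trailing path components shared between target and candidate."""
--     t = target.split("/")
--     c = candidate.split("/")
--     n = 0
--     for a, b in zip(reversed(t), reversed(c)):
--         if a == b:
--             n += 1
--         else:
--             break
--     return n
-- ===== SOURCE B (Python) =====
-- def _path_overlap_score(target: str, candidate: str) -> int:
--     """Number of trailing path components shared between target and candidate."""
--
--     def common(xs, ys):
--         if xs and ys and xs[0] == ys[0]: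
--             return 1 + common(xs[1:], ys[1:])
--         return 0
--
--     return common(target.split("/")[::-1], candidate.split("/")[::-1])
-- ===== Notes on version B (the rewrite author's own statement) =====
-- stated objective: alternative
-- what changed: Replaces the zipped-iterators loop threading a counter with an early break by a recursive common-prefix count over the two reversed component lists (no zip, no accumulator, no break).
import Mathlib
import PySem

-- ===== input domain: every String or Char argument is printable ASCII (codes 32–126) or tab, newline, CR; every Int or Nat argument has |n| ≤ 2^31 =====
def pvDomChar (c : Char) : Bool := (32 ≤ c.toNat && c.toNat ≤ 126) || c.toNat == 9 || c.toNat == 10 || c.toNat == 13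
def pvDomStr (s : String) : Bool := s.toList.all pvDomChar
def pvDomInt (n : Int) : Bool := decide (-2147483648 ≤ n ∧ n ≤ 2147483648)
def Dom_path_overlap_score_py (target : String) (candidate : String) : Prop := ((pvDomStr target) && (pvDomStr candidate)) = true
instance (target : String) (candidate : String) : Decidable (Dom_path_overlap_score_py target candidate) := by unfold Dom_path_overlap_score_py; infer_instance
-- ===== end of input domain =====

-- B replaces the zipped counter loop with an early break by a recursive common-prefix
-- count over the two reversed component lists (alternative decomposition, same cost).

-- ===== PORT A =====
-- 'for a, b in zip(reversed(t), reversed(c)): if a == b: n += 1 else: break'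
def pathOverlapLoopA : List (String × String) → Int → Int
  | [], n => n
  | (a, b) :: rest, n => if a == b then pathOverlapLoopA rest (n + 1) else n

def path_overlap_score_py (target : String) (candidate : String) : Int :=
  let t := (PySem.Str.split? target "/").getD []
  let c := (PySem.Str.split? candidate "/").getD []
  pathOverlapLoopA (List.zip t.reverse c.reverse) 0

-- ===== PORT B =====
-- Source B's recursive helper 'common'
def pathCommonB : List String → List String → Int
  | x :: xs, y :: ys => if x == y then 1 + pathCommonB xs ys else 0
  | _, _ => 0

def path_overlap_score_py_alt (target : String) (candidate : String) : Int :=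
  pathCommonB ((PySem.Str.split? target "/").getD []).reverse ((PySem.Str.split? candidate "/").getD []).reverse

-- ===== PRECONDITION & SPEC =====
def Spec_path_overlap_score_py (target : String) (candidate : String) (out : Int) : Prop := out = path_overlap_score_py_alt target candidate
instance (target : String) (candidate : String) (out : Int) : Decidable (Spec_path_overlap_score_py target candidate out) := by unfold Spec_path_overlap_score_py; infer_instance

-- ===== CLAIM (what is proved, stated in full; the proofs are below) =====
def Claim_equal_path_overlap_score_py : Prop := ∀ (target : String) (candidate : String), Dom_path_overlap_score_py target candidate → Spec_path_overlap_score_py target candidate (path_overlap_score_py target candidate)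

-- ===== LEMMAS AND PROOFS =====

lemma pathLoop_eq_common (xs ys : List String) (n : Int) :
    pathOverlapLoopA (List.zip xs ys) n = n + pathCommonB xs ys := by
  induction xs generalizing ys n with
  | nil => simp [pathOverlapLoopA, pathCommonB]
  | cons x xs ih =>
    cases ys with
    | nil => simp [pathOverlapLoopA, pathCommonB]
    | cons y ys =>
      simp only [List.zip_cons_cons, pathOverlapLoopA, pathCommonB]
      split
      · rw [ih]; ring
      · simp

-- ===== VERDICT (by name: the statement is the Claim_ definition above) =====
theorem path_overlap_score_py_spec : Claim_equal_path_overlap_score_py := by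
  intro t c _
  unfold Spec_path_overlap_score_py path_overlap_score_py path_overlap_score_py_alt
  simpa using pathLoop_eq_common _ _ 0
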